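-- pv_equiv track=rewrite | github.com/lMoonHawk/nonogram | features testing/algo solver.py | blank_combin
-- ===== SOURCE A (Python) =====
-- def blank_combin(n, k, n_ini=None):
--     if not n_ini:
--         n_ini = n
--     if n == 1:
--         return [[k]]
--     ways = []
--     for i in range(k + 1):
--         if i == 0 and (0 < n < n_ini):
--             continue
--         sub_ways = blank_combin(n - 1, k - i, n_ini)
--         for sub_way in sub_ways:
--             ways.append([i] + sub_way)
--     return ways
-- ===== SOURCE B (Python) =====
-- def blank_combin(n, k, n_ini=None):
--     if not n_ini:
--         n_ini = n
--     if n == 1: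
--         return [[k]]
--     # breadth-first: expand (prefix, remaining) states one slot at a time
--     states = [([], k)]
--     for j in range(n - 1):
--         if not states:
--             break
--         r = n - j  # slots still to fill at this position
--         lo = 1 if 0 < r < n_ini else 0
--         states = [(pre + [i], rem - i) for pre, rem in states for i in range(lo, rem + 1)]
--     return [pre + [rem] for pre, rem in states]
-- ===== Notes on version B (the rewrite author's own statement) =====
-- stated objective: alternative
-- what changed: Replaces A's depth-first recursion with an iterative breadth-first expansion: a list of (prefix, remaining-blanks) states is widened one slot at a time by a comprehension, with no recursion.
-- outside the precondition, e.g. on blank_combin(0, -1, None): A returns [], B returns [[-1]]; on blank_combin(0, 2, None): A raises RecursionError, B returns [[2]]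
import Mathlib
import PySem

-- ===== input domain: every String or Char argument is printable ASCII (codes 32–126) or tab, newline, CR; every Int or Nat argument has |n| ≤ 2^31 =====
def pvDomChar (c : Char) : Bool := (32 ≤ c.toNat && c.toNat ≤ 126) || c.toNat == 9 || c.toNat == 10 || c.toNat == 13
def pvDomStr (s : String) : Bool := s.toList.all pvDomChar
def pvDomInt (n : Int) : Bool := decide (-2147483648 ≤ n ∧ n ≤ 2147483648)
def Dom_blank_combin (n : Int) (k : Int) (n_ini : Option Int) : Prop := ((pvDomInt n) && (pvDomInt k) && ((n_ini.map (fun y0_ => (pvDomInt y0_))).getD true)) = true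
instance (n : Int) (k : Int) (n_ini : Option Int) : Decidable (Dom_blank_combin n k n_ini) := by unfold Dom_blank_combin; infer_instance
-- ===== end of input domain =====

-- B replaces A's depth-first recursion by an iterative breadth-first expansion of
-- (prefix, remaining) states, one slot per pass; same output, similar cost (objective: alternative).

-- ===== PORT A =====
-- A recurses on n with no base case for n ≤ 0, so the port carries a fuel counter
-- (n.toNat + 1 at the top call: enough for every n ≥ 1; fuel 0 returns [], reached
-- only outside Pre_).  Python's default `n_ini=None` with `if not n_ini: n_ini = n`
-- treats None and 0 identically (both falsy), so the Option is encoded as the Int 0.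
def blankA (fuel : Nat) (n k : Int) (ni_arg : Int) : List (List Int) :=
  match fuel with
  | 0 => []
  | Nat.succ f =>
    let ni : Int := if ni_arg = 0 then n else ni_arg
    if n = 1 then [[k]]
    else
      (PySem.List.pyRange 0 (k + 1) 1).foldl
        (fun ways i =>
          if i = 0 ∧ 0 < n ∧ n < ni then ways
          else ways ++ (blankA f (n - 1) (k - i) ni).map (fun sw => i :: sw)) []

def blank_combin (n : Int) (k : Int) (n_ini : Option Int) : List (List Int) :=
  blankA (n.toNat + 1) n k (n_ini.getD 0)

-- ===== PORT B =====
-- the `for j in range(n-1): if not states: break; …` loop of Source B: a counted loop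
-- (c passes left, current index j), stopping early on `break`; range(n-1) is lazy in
-- Python, so the loop is ported as counted recursion rather than a materialised list
def altLoop (n ni : Int) : Nat → Int → List (List Int × Int) → List (List Int × Int)
  | 0, _, states => states
  | Nat.succ c, j, states =>
    if states = [] then states
    else
      altLoop n ni c (j + 1)
        (let r := n - j
         let lo : Int := if 0 < r ∧ r < ni then 1 else 0
         states.flatMap (fun pr =>
           (PySem.List.pyRange lo (pr.2 + 1) 1).map (fun i => (pr.1 ++ [i], pr.2 - i))))

def blank_combin_alt (n : Int) (k : Int) (n_ini : Option Int) : List (List Int) :=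
  let ni0 : Int := n_ini.getD 0
  let ni : Int := if ni0 = 0 then n else ni0
  if n = 1 then [[k]]
  else
    (altLoop n ni (n - 1).toNat 0 [(([] : List Int), k)]).map
      (fun pr => pr.1 ++ [pr.2])

-- ===== PRECONDITION & SPEC =====
-- Pre_ restricts to the natural domain of at least one slot: for n ≤ 0 A has no base
-- case — it hits Python's recursion limit (RecursionError) when k ≥ 0, and returns an
-- accidental [] (empty range before any recursive call) when k < 0.
def Pre_blank_combin (n : Int) (k : Int) (n_ini : Option Int) : Prop := 1 ≤ n
instance (n : Int) (k : Int) (n_ini : Option Int) : Decidable (Pre_blank_combin n k n_ini) := by unfold Pre_blank_combin; infer_instance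
def pvWitness_blank_combin : Int × Int × Option Int := (2, 2, none)

def Spec_blank_combin (n : Int) (k : Int) (n_ini : Option Int) (out : List (List Int)) : Prop := out = blank_combin_alt n k n_ini
instance (n : Int) (k : Int) (n_ini : Option Int) (out : List (List Int)) : Decidable (Spec_blank_combin n k n_ini out) := by unfold Spec_blank_combin; infer_instance

-- ===== CLAIM (what is proved, stated in full; the proofs are below) =====
def Claim_equal_blank_combin : Prop := ∀ (n : Int) (k : Int) (n_ini : Option Int), Dom_blank_combin n k n_ini → Pre_blank_combin n k n_ini → Spec_blank_combin n k n_ini (blank_combin n k n_ini)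

-- ===== LEMMAS AND PROOFS =====

-- common characterisation: distributions of k blanks over (m+1) slots, threshold ni
def S : Nat → Int → Int → List (List Int)
  | 0, k, _ => [[k]]
  | m + 1, k, ni =>
    (PySem.List.pyRange (if ((m : Int) + 2) < ni then 1 else 0) (k + 1) 1).flatMap
      (fun i => (S m (k - i) ni).map (fun sw => i :: sw))

-- one pass of B's loop, as a named function
def stepS (ni : Int) (states : List (List Int × Int)) (r : Int) : List (List Int × Int) :=
  states.flatMap (fun pr =>
    (PySem.List.pyRange (if 0 < r ∧ r < ni then 1 else 0) (pr.2 + 1) 1).map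
      (fun i => (pr.1 ++ [i], pr.2 - i)))

theorem foldl_skipP {α : Type} (l : List Int) (P : Int → Prop) [DecidablePred P]
    (g : Int → List α) (acc : List α) :
    l.foldl (fun ways i => if P i then ways else ways ++ g i) acc
      = acc ++ (l.filter (fun i => !decide (P i))).flatMap g := by
  induction l generalizing acc with
  | nil => simp
  | cons a t ih =>
    by_cases h : P a <;> simp [h, ih, List.append_assoc]

theorem filter_pyRange_ne_zero (k : Int) :
    (PySem.List.pyRange 0 (k + 1) 1).filter (fun i => !decide (i = 0))
      = PySem.List.pyRange 1 (k + 1) 1 := by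
  by_cases h : k + 1 ≤ 0
  · rw [PySem.List.pyRange_one_eq_nil (by omega), PySem.List.pyRange_one_eq_nil (by omega)]
    rfl
  · rw [PySem.List.pyRange_one_cons (by omega)]
    rw [List.filter_cons_of_neg (by simp)]
    apply List.filter_eq_self.mpr
    intro a ha
    have := (PySem.List.mem_pyRange_one).mp ha
    simp; omega

theorem A_eq_S (m : Nat) : ∀ (fuel : Nat), m + 1 ≤ fuel → ∀ (k ni : Int), ni ≠ 0 →
    blankA fuel ((m : Int) + 1) k ni = S m k ni := by
  induction m with
  | zero =>
    intro fuel h k ni hni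
    match fuel, h with
    | Nat.succ f, _ => simp [blankA, S]
  | succ m ih =>
    intro fuel h k ni hni
    match fuel, h with
    | Nat.succ f, h =>
      have hf : m + 1 ≤ f := by omega
      simp only [blankA]
      rw [if_neg hni]
      push_cast
      rw [if_neg (by omega)]
      rw [foldl_skipP _ (fun i => i = 0 ∧ 0 < (m : Int) + 1 + 1 ∧ (m : Int) + 1 + 1 < ni)]
      have harg : ∀ i : Int, blankA f ((m : Int) + 1 + 1 - 1) (k - i) ni = S m (k - i) ni := by
        intro i
        have : (m : Int) + 1 + 1 - 1 = (m : Int) + 1 := by ring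
        rw [this, ih f hf (k - i) ni hni]
      by_cases hc : ((m : Int) + 1 + 1) < ni
      · have h0 : (0 : Int) < (m : Int) + 1 + 1 := by positivity
        simp only [h0, hc, and_true]
        rw [filter_pyRange_ne_zero]
        show _ = S (m + 1) k ni
        rw [S]
        rw [if_pos (by push_cast; omega)]
        simp only [List.nil_append]
        apply List.flatMap_congr
        intro i _
        rw [harg]
      · simp only [hc, and_false, decide_false, Bool.not_false, List.filter_true]
        show _ = S (m + 1) k ni
        rw [S]
        rw [if_neg (by omega)]
        simp only [List.nil_append]
        apply List.flatMap_congr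
        intro i _
        rw [harg]

theorem stepS_nil (ni r : Int) : stepS ni [] r = [] := by simp [stepS]

theorem foldl_stepS_nil (ni : Int) (φ : Int → Int) (rs : List Int) :
    rs.foldl (fun st r => stepS ni st (φ r)) [] = [] := by
  induction rs with
  | nil => rfl
  | cons a t ih => simpa [stepS_nil] using ih

theorem foldl_stepS_append (ni : Int) (φ : Int → Int) (rs : List Int) :
    ∀ (s t : List (List Int × Int)),
    rs.foldl (fun st r => stepS ni st (φ r)) (s ++ t)
      = rs.foldl (fun st r => stepS ni st (φ r)) s ++ rs.foldl (fun st r => stepS ni st (φ r)) t := by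
  induction rs with
  | nil => intro s t; rfl
  | cons a rs ih =>
    intro s t
    have : stepS ni (s ++ t) (φ a) = stepS ni s (φ a) ++ stepS ni t (φ a) := by simp [stepS]
    simp only [List.foldl_cons, this, ih]

theorem foldl_stepS_flatMap {β : Type} (ni : Int) (φ : Int → Int) (rs : List Int) (l : List β)
    (h : β → List (List Int × Int)) :
    rs.foldl (fun st r => stepS ni st (φ r)) (l.flatMap h)
      = l.flatMap (fun b => rs.foldl (fun st r => stepS ni st (φ r)) (h b)) := by
  induction l with
  | nil => simpa using foldl_stepS_nil ni φ rs
  | cons b l ih => simp [List.flatMap_cons, foldl_stepS_append, ih]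

theorem foldl_stepS_prefix (ni : Int) (φ : Int → Int) (rs : List Int) :
    ∀ (states : List (List Int × Int)) (pre : List Int),
    rs.foldl (fun st r => stepS ni st (φ r)) (states.map (fun pr => (pre ++ pr.1, pr.2)))
      = (rs.foldl (fun st r => stepS ni st (φ r)) states).map (fun pr => (pre ++ pr.1, pr.2)) := by
  induction rs with
  | nil => intro states pre; rfl
  | cons a rs ih =>
    intro states pre
    have : stepS ni (states.map (fun pr => (pre ++ pr.1, pr.2))) (φ a)
        = (stepS ni states (φ a)).map (fun pr => (pre ++ pr.1, pr.2)) := by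
      simp [stepS, List.flatMap_map, List.map_flatMap, Function.comp_def, List.map_map,
        List.append_assoc]
    simp only [List.foldl_cons, this, ih]

theorem pyRange_shift (m : Nat) :
    PySem.List.pyRange 1 ((m : Int) + 1) 1 = (PySem.List.pyRange 0 (m : Int) 1).map (· + 1) := by
  rw [PySem.List.pyRange_one, PySem.List.pyRange_one]
  simp [List.map_map, Function.comp_def, add_comm]

theorem B_core (m : Nat) : ∀ (k ni : Int),
    ((PySem.List.pyRange 0 (m : Int) 1).foldl
        (fun st j => stepS ni st ((m : Int) + 1 - j)) [(([] : List Int), k)]).map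
      (fun pr => pr.1 ++ [pr.2]) = S m k ni := by
  induction m with
  | zero =>
    intro k ni
    rw [PySem.List.pyRange_one_eq_nil (by omega)]
    simp [S]
  | succ m ih =>
    intro k ni
    push_cast
    rw [PySem.List.pyRange_one_cons (by positivity)]
    rw [List.foldl_cons]
    have hstep1 : stepS ni [(([] : List Int), k)] ((m : Int) + 1 + 1 - 0)
        = (PySem.List.pyRange (if ((m : Int) + 2) < ni then 1 else 0) (k + 1) 1).flatMap
            (fun i => [([i], k - i)]) := by
      simp only [stepS, List.flatMap_cons, List.flatMap_nil, List.append_nil, List.nil_append]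
      have : ((m : Int) + 1 + 1 - 0) = (m : Int) + 2 := by ring
      rw [this]
      have hcond : (0 < (m : Int) + 2 ∧ (m : Int) + 2 < ni) ↔ ((m : Int) + 2 < ni) := by
        constructor
        · exact fun h => h.2
        · exact fun h => ⟨by positivity, h⟩
      rw [if_congr hcond rfl rfl]
      exact List.map_eq_flatMap
    rw [hstep1]
    have h01 : (0 : Int) + 1 = 1 := by norm_num
    rw [h01, pyRange_shift m, List.foldl_map]
    have hfun : (fun (st : List (List Int × Int)) (j : Int) => stepS ni st ((m : Int) + 1 + 1 - (j + 1)))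
        = (fun st j => stepS ni st ((m : Int) + 1 - j)) := by
      funext st j
      congr 1
      ring
    rw [hfun]
    rw [foldl_stepS_flatMap ni (fun j => (m : Int) + 1 - j)]
    rw [List.map_flatMap]
    show _ = S (m + 1) k ni
    rw [S]
    apply List.flatMap_congr
    intro i _
    have hsing : [([i], k - i)] = [(([] : List Int), k - i)].map (fun pr => ([i] ++ pr.1, pr.2)) := by
      simp
    rw [hsing, foldl_stepS_prefix ni (fun j => (m : Int) + 1 - j), List.map_map]
    have hcomp : ((fun pr : List Int × Int => pr.1 ++ [pr.2]) ∘ (fun pr : List Int × Int => ([i] ++ pr.1, pr.2)))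
        = (fun sw => i :: sw) ∘ (fun pr : List Int × Int => pr.1 ++ [pr.2]) := by
      funext pr
      simp
    rw [hcomp, ← List.map_map, ih (k - i) ni]

-- the counted break-on-empty loop computes the fold over range(j, j+c)
-- (one empty pass keeps states empty, so breaking early changes nothing)
theorem altLoop_eq_foldl (n ni : Int) (c : Nat) :
    ∀ (j : Int) (states : List (List Int × Int)), altLoop n ni c j states
      = (PySem.List.pyRange j (j + (c : Int)) 1).foldl (fun st jj => stepS ni st (n - jj)) states := by
  induction c with
  | zero =>
    intro j states
    rw [PySem.List.pyRange_one_eq_nil (by omega)]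
    rfl
  | succ c ih =>
    intro j states
    have hr : PySem.List.pyRange j (j + ((c : Nat) + 1 : Nat)) 1
        = j :: PySem.List.pyRange (j + 1) (j + ((c : Nat) + 1 : Nat)) 1 :=
      PySem.List.pyRange_one_cons (by push_cast; omega)
    by_cases hs : states = []
    · subst hs
      rw [altLoop, if_pos rfl, hr, List.foldl_cons]
      rw [show stepS ni [] (n - j) = [] from stepS_nil ni (n - j)]
      exact (foldl_stepS_nil ni (fun jj => n - jj) _).symm
    · rw [altLoop, if_neg hs, hr, List.foldl_cons, ih (j + 1)]
      have h1 : j + 1 + (c : Int) = j + ((c : Nat) + 1 : Nat) := by push_cast; ring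
      rw [h1]
      rfl

-- A's body with the defaulting of n_ini already folded into the argument
theorem blankA_norm (f : Nat) (n k a : Int) :
    blankA (Nat.succ f) n k a = blankA (Nat.succ f) n k (if a = 0 then n else a) := by
  simp only [blankA]
  by_cases ha : a = 0
  · simp [ha]
  · simp [ha]

-- ===== VERDICT (by name: the statement is the Claim_ definition above) =====
theorem blank_combin_spec : Claim_equal_blank_combin := by
  intro n k n_ini _ hpre
  unfold Pre_blank_combin at hpre
  unfold Spec_blank_combin
  by_cases h1 : n = 1
  · subst h1
    simp [blank_combin, blank_combin_alt, blankA]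
  · obtain ⟨m, hm⟩ : ∃ m : Nat, n = (m : Int) + 1 := ⟨(n - 1).toNat, by omega⟩
    subst hm
    have hm1 : 1 ≤ m := by omega
    have hni : (if n_ini.getD 0 = 0 then (m : Int) + 1 else n_ini.getD 0) ≠ 0 := by
      split_ifs with h <;> omega
    have htn : ((m : Int) + 1).toNat + 1 = Nat.succ (m + 1) := by omega
    unfold blank_combin
    rw [htn, blankA_norm]
    rw [A_eq_S m (Nat.succ (m + 1)) (by omega) k _ hni]
    unfold blank_combin_alt
    rw [if_neg h1]
    have hsub : ((m : Int) + 1 - 1).toNat = m := by omega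
    rw [hsub, altLoop_eq_foldl]
    have h0m : (0 : Int) + (m : Int) = (m : Int) := by ring
    rw [h0m, B_core m k _]
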